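-- pv_equiv track=rewrite | github.com/UniNilsBrehm/PrDA_Classification | figure_heat_map.py | create_alternating_pattern
-- ===== SOURCE A (Python) =====
-- def create_alternating_pattern(group_numbers):
--     alternating = []
--     current_value = 0  # Start with 0
--     alternating.append(current_value)
--
--     for i in range(1, len(group_numbers)):
--         if group_numbers[i] != group_numbers[i - 1]:
--             current_value = 1 - current_value  # Flip between 0 and 1
--         alternating.append(current_value)
--
--     return alternating
-- ===== SOURCE B (Python) =====
-- def _runs(xs):
--     # Run-length encode: list of (value, length) for maximal blocks of equal values.
--     runs = []
--     for x in xs: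
--         if runs and runs[-1][0] == x:
--             runs[-1] = (x, runs[-1][1] + 1)
--         else:
--             runs.append((x, 1))
--     return runs
--
--
-- def create_alternating_pattern(group_numbers):
--     # Phase 1: run-length encode the input; Phase 2: label the k-th run with k % 2
--     # and expand each label to the run's length.
--     pattern = []
--     for k, (_, n) in enumerate(_runs(group_numbers)):
--         pattern.extend([k % 2] * n)
--     return pattern
-- ===== Notes on version B (the rewrite author's own statement) =====
-- stated objective: alternative
-- what changed: Replaces A's single pass toggling a 0/1 state on each adjacent change with a run-length encoding of the input followed by labelling the k-th run with k % 2 and expanding each label to the run's length.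
-- intended difference: On the empty list A returns a one-element list holding a single zero (it appends the initial zero before ever looking at the input) while B returns the empty list, the intended value since the pattern should have one label per input element. — e.g. on create_alternating_pattern([]): A returns [0], B returns []
import Mathlib
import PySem

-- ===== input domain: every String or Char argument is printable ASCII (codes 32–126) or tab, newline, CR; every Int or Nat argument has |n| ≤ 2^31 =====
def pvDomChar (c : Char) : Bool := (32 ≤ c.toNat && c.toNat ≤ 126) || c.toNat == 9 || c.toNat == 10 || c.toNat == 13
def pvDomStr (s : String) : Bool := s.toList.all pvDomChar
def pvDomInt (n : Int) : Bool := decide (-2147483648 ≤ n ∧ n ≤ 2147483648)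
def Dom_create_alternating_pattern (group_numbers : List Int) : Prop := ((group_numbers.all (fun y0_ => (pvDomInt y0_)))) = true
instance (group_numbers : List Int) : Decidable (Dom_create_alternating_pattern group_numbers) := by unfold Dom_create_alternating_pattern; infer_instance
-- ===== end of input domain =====

-- B replaces A's stateful 0/1 toggle pass with run-length encoding plus parity labelling of runs (alternative decomposition; same cost); on the empty list B returns the empty list where A returns a single zero (stated as D_).


-- ===== PORT A =====
def create_alternating_pattern (group_numbers : List Int) : List Int :=
  -- alternating = [0]; for i in range(1, len): if g[i] != g[i-1]: cur = 1 - cur; append(cur)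
  ((PySem.List.pyRange 1 (PySem.List.len group_numbers) 1).foldl
    (fun (st : List Int × Int) i =>
      let cur := if PySem.List.pyGetD group_numbers i 0 ≠ PySem.List.pyGetD group_numbers (i - 1) 0
                 then 1 - st.2 else st.2
      (st.1 ++ [cur], cur))
    ([0], 0)).1

-- ===== PORT B =====
-- _runs: run-length encoding loop ('if runs and runs[-1][0] == x: bump last else append (x,1)')
def pvRuns (xs : List Int) : List (Int × Nat) :=
  xs.foldl
    (fun (runs : List (Int × Nat)) x =>
      match runs.getLast? with
      | some p => if p.1 = x then runs.dropLast ++ [(x, p.2 + 1)] else runs ++ [(x, 1)]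
      | none => runs ++ [(x, 1)])
    []

def create_alternating_pattern_alt (group_numbers : List Int) : List Int :=
  -- for k, (_, n) in enumerate(_runs(g)): pattern.extend([k % 2] * n)
  (PySem.List.enumerate (pvRuns group_numbers) 0).foldl
    (fun (pattern : List Int) pr => pattern ++ List.replicate pr.2.2 (PySem.Int.mod pr.1 2))
    []

-- ===== PRECONDITION & SPEC =====
-- On the empty list A returns a one-element list holding a single zero (it appends the initial
-- zero before ever looking at the input) while B returns the empty list, the intended value:
-- the pattern should have one label per input element.
def D_create_alternating_pattern (group_numbers : List Int) : Prop := group_numbers = []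
instance (group_numbers : List Int) : Decidable (D_create_alternating_pattern group_numbers) := by unfold D_create_alternating_pattern; infer_instance
def Spec_create_alternating_pattern (group_numbers : List Int) (out : List Int) : Prop := ¬ D_create_alternating_pattern group_numbers → out = create_alternating_pattern_alt group_numbers
instance (group_numbers : List Int) (out : List Int) : Decidable (Spec_create_alternating_pattern group_numbers out) := by unfold Spec_create_alternating_pattern; infer_instance
def pvDiffWitness_create_alternating_pattern : List Int := []
def pvDiffWitnessOut_create_alternating_pattern : (List Int) × (List Int) := ([0], [])

-- ===== CLAIM (what is proved, stated in full; the proofs are below) =====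
def Claim_unchanged_create_alternating_pattern : Prop := ∀ (group_numbers : List Int), Dom_create_alternating_pattern group_numbers → Spec_create_alternating_pattern group_numbers (create_alternating_pattern group_numbers)
def Claim_changed_create_alternating_pattern : Prop := Dom_create_alternating_pattern (pvDiffWitness_create_alternating_pattern) ∧ D_create_alternating_pattern (pvDiffWitness_create_alternating_pattern) ∧ create_alternating_pattern (pvDiffWitness_create_alternating_pattern) = pvDiffWitnessOut_create_alternating_pattern.1 ∧ create_alternating_pattern_alt (pvDiffWitness_create_alternating_pattern) = pvDiffWitnessOut_create_alternating_pattern.2 ∧ pvDiffWitnessOut_create_alternating_pattern.1 ≠ pvDiffWitnessOut_create_alternating_pattern.2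
def Claim_exact_create_alternating_pattern : Prop := ∀ (group_numbers : List Int), Dom_create_alternating_pattern group_numbers → D_create_alternating_pattern group_numbers → create_alternating_pattern group_numbers ≠ create_alternating_pattern_alt group_numbers

-- ===== LEMMAS AND PROOFS =====

-- Reference: the pattern A emits after the initial 0, driven by adjacent pairs (g[i], g[i-1]).
def pvPat : Int → List (Int × Int) → List Int
  | _, [] => []
  | cur, (a, b) :: ps =>
    let c := if a ≠ b then 1 - cur else cur
    c :: pvPat c ps

-- Recursive run-length encoder (proof-side characterization of pvRuns).
def pvRunsAux : Int → Nat → List Int → List (Int × Nat)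
  | k, n, [] => [(k, n)]
  | k, n, x :: xs => if x = k then pvRunsAux k (n + 1) xs else (k, n) :: pvRunsAux x 1 xs

-- Alternating-label expansion of a run list starting with label q.
def pvExpand : Int → List (Int × Nat) → List Int
  | _, [] => []
  | q, (_, n) :: rs => List.replicate n q ++ pvExpand (1 - q) rs

lemma pvFoldA (g : List Int) : ∀ (n k : Nat), 1 ≤ k → g.length - k = n →
    ∀ (acc : List Int) (cur : Int),
    ((PySem.List.pyRange (k : Int) (PySem.List.len g) 1).foldl
      (fun (st : List Int × Int) i =>
        let c := if PySem.List.pyGetD g i 0 ≠ PySem.List.pyGetD g (i - 1) 0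
                 then 1 - st.2 else st.2
        (st.1 ++ [c], c))
      (acc, cur)).1
    = acc ++ pvPat cur ((g.tail.zip g).drop (k - 1)) := by
  intro n
  induction n with
  | zero =>
    intro k hk hlen acc cur
    rw [PySem.List.pyRange_one_eq_nil (by simp [PySem.List.len_eq]; omega)]
    rw [List.drop_eq_nil_of_le (by simp [List.length_zip, List.length_tail]; omega)]
    simp [pvPat]
  | succ m ih =>
    intro k hk hlen acc cur
    have hklt : k < g.length := by omega
    rw [PySem.List.pyRange_one_cons (by simp [PySem.List.len_eq]; omega)]
    simp only [List.foldl_cons]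
    have hcast : (k : Int) + 1 = ((k + 1 : Nat) : Int) := by push_cast; ring
    rw [hcast, ih (k + 1) (by omega) (by omega)]
    have hlz : (g.tail.zip g).length = g.length - 1 := by
      simp [List.length_zip, List.length_tail]
    have hidx : k - 1 < (g.tail.zip g).length := by omega
    have hdrop : (g.tail.zip g).drop (k - 1)
        = (g.tail.zip g)[k - 1] :: (g.tail.zip g).drop k := by
      have := List.drop_eq_getElem_cons hidx
      simpa [show k - 1 + 1 = k by omega] using this
    have hkk : k - 1 + 1 = k := by omega
    have hget : (g.tail.zip g)[k - 1] = (g[k], g[k - 1]) := by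
      simp [List.getElem_zip, List.getElem_tail, hkk]
    rw [hdrop, hget]
    have hk1 : PySem.List.pyGetD g (k : Int) 0 = g[k] :=
      PySem.List.pyGetD_ofNat g k 0 hklt
    have hk2 : PySem.List.pyGetD g ((k : Int) - 1) 0 = g[k - 1] := by
      have hc : (k : Int) - 1 = ((k - 1 : Nat) : Int) := by omega
      rw [hc, PySem.List.pyGetD_ofNat g (k - 1) 0 (by omega)]
    simp only [hk1, hk2, pvPat]
    simp

-- The foldl in pvRuns, once a run is open, behaves like the recursive encoder.
lemma pvRuns_foldl : ∀ (rest : List Int) (acc : List (Int × Nat)) (k : Int) (n : Nat),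
    rest.foldl
      (fun (runs : List (Int × Nat)) x =>
        match runs.getLast? with
        | some p => if p.1 = x then runs.dropLast ++ [(x, p.2 + 1)] else runs ++ [(x, 1)]
        | none => runs ++ [(x, 1)])
      (acc ++ [(k, n)])
    = acc ++ pvRunsAux k n rest := by
  intro rest
  induction rest with
  | nil => intro acc k n; simp [pvRunsAux]
  | cons x xs ih =>
    intro acc k n
    simp only [List.foldl_cons, List.getLast?_concat, pvRunsAux]
    by_cases h : k = x
    · subst h
      rw [if_pos rfl, if_pos rfl, List.dropLast_concat]
      exact ih acc _ (n + 1)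
    · rw [if_neg h, if_neg (fun hx : x = k => h hx.symm)]
      have := ih (acc ++ [(k, n)]) x 1
      simpa [List.append_assoc] using this

lemma pvRuns_cons (x : Int) (xs : List Int) : pvRuns (x :: xs) = pvRunsAux x 1 xs := by
  unfold pvRuns
  simp only [List.foldl_cons, List.getLast?_nil]
  have := pvRuns_foldl xs [] x 1
  simpa using this

-- The enumerate/extend loop of B equals the alternating expansion.
lemma pvFoldB : ∀ (rs : List (Int × Nat)) (off : Int), 0 ≤ off → ∀ (acc : List Int),
    (PySem.List.enumerate rs off).foldl
      (fun (pattern : List Int) pr => pattern ++ List.replicate pr.2.2 (PySem.Int.mod pr.1 2)) acc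
    = acc ++ pvExpand (PySem.Int.mod off 2) rs := by
  intro rs
  induction rs with
  | nil => intro off _ acc; simp [PySem.List.enumerate_nil, pvExpand]
  | cons r rest ih =>
    intro off hoff acc
    obtain ⟨v, n⟩ := r
    rw [PySem.List.enumerate_cons, List.foldl_cons]
    have hmod : ∀ t : Int, 0 ≤ t → PySem.Int.mod t 2 = t % 2 := fun t _ =>
      PySem.Int.mod_eq_emod_of_pos (by omega)
    have h1 : PySem.Int.mod (off + 1) 2 = 1 - PySem.Int.mod off 2 := by
      rw [hmod off hoff, hmod (off + 1) (by omega)]; omega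
    rw [ih (off + 1) (by omega), h1]
    simp [pvExpand]

-- A's toggled pattern over a run list equals the alternating expansion.
lemma pvPat_runs : ∀ (xs : List Int) (k p : Int) (n : Nat), (p = 0 ∨ p = 1) →
    List.replicate n p ++ pvPat p (xs.zip (k :: xs)) = pvExpand p (pvRunsAux k n xs) := by
  intro xs
  induction xs with
  | nil => intro k p n _; simp [pvPat, pvRunsAux, pvExpand]
  | cons x rest ih =>
    intro k p n hp
    simp only [List.zip_cons_cons, pvPat, pvRunsAux]
    by_cases h : x = k
    · subst h
      simp only [ne_eq, not_true_eq_false, if_false, if_true]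
      rw [← ih x p (n + 1) hp]
      simp [List.replicate_succ', List.append_assoc]
    · simp only [ne_eq, h, not_false_eq_true, if_true, if_false, pvExpand]
      rw [← ih x (1 - p) 1 (by omega)]
      simp

theorem pv_main (g : List Int) (hg : g ≠ []) :
    create_alternating_pattern g = create_alternating_pattern_alt g := by
  obtain ⟨x, xs, rfl⟩ := List.exists_cons_of_ne_nil hg
  unfold create_alternating_pattern create_alternating_pattern_alt
  have hA := pvFoldA (x :: xs) ((x :: xs).length - 1) 1 (by omega) (by omega) [0] 0
  simp only [Nat.cast_one] at hA
  rw [hA, pvRuns_cons, pvFoldB _ 0 (by omega) []]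
  have h0 : PySem.Int.mod 0 2 = 0 := by decide
  rw [h0]
  have := pvPat_runs xs x 0 1 (Or.inl rfl)
  simpa using this

-- ===== VERDICT (by name: the statement is the Claim_ definition above) =====
theorem create_alternating_pattern_spec : Claim_unchanged_create_alternating_pattern := by
  intro g _ hD
  exact pv_main g hD

theorem create_alternating_pattern_changed : Claim_changed_create_alternating_pattern := by
  unfold Claim_changed_create_alternating_pattern; decide

theorem create_alternating_pattern_tight : Claim_exact_create_alternating_pattern := by
  intro g _ hD
  unfold D_create_alternating_pattern at hD
  subst hD
  decide
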